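-- pv_equiv track=rewrite | github.com/Eighty-5/PIF-Soul-Manager | pifsm/db_updater/updatertest.py | sanitized_sprite_code
-- ===== SOURCE A (Python) =====
-- import string
--
-- ALPHABET = string.ascii_lowercase
--
-- ALLOWED_SPRITE_CODE_CHAR = set(ALPHABET + string.digits + '.')
--
-- def sanitized_sprite_code(sprite_code):
--     """Filters our invalid sprite codes and returns values needed for app"""
--     split_sprite_code = sprite_code.split('.')
--     if not str_check(sprite_code, ALLOWED_SPRITE_CODE_CHAR):
--         return None, None, None, 'SPECIAL CHARACTERS'
--     if len(split_sprite_code) >= 3: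
--         return None, None, None, 'TRIPLE+ FUSION'
--     sprite_group = split_sprite_code[0]
--     if len(split_sprite_code) >= 2: # Setup for triple fusions later if desired
--         last_number = split_sprite_code[-1]
--         stripped_last_number = last_number.rstrip(ALPHABET)
--         for pokedex_number in split_sprite_code[:-1] + [stripped_last_number]:
--             if not pokedex_number.isdigit():
--                 return None, None, None, 'EXTRA LETTERS'
--         variant = last_number[len(stripped_last_number):]
--         split_sprite_code[-1] = stripped_last_number
--         recombined_number = sprite_code[:len(sprite_code)-len(variant)]
--     else:
--         sprite_group = sprite_group.rstrip(ALPHABET)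
--         variant = sprite_code[len(sprite_group):]
--         recombined_number = sprite_group
--     return sprite_group, recombined_number, variant, None
--
-- def str_check(s, substr):
--     """Returns True if all characters in string 's' are of substring 'substr'"""
--     return set(s) <= substr
-- ===== SOURCE B (Python) =====
-- import string
--
-- ALPHABET = string.ascii_lowercase
--
-- ALLOWED_SPRITE_CODE_CHAR = set(ALPHABET + string.digits + '.')
--
--
-- def sanitized_sprite_code(sprite_code):
--     """Single scan version: find the maximal trailing lowercase run once on the
--     whole string instead of branch-specific split/rstrip/slice bookkeeping."""
--     if not all(c in ALLOWED_SPRITE_CODE_CHAR for c in sprite_code):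
--         return None, None, None, 'SPECIAL CHARACTERS'
--     ndots = sprite_code.count('.')
--     if ndots >= 2:
--         return None, None, None, 'TRIPLE+ FUSION'
--     # length of the maximal trailing run of lowercase letters of the whole string
--     t = 0
--     rev = sprite_code[::-1]
--     while t < len(rev) and 'a' <= rev[t] <= 'z':
--         t += 1
--     cut = len(sprite_code) - t
--     number = sprite_code[:cut]
--     variant = sprite_code[cut:]
--     if ndots == 1:
--         head, _, tail = number.partition('.')
--         if not (head.isdigit() and tail.isdigit()):
--             return None, None, None, 'EXTRA LETTERS'
--         return head, number, variant, None
--     return number, number, variant, None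
-- ===== Notes on version B (the rewrite author's own statement) =====
-- stated objective: simpler
-- what changed: Instead of splitting on the dot and doing branch-specific rstrip/slice/index bookkeeping, B counts dots, finds the maximal trailing lowercase run once on the whole (reversed) string, and derives number/variant by one cut plus a partition at the first dot.
import Mathlib
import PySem

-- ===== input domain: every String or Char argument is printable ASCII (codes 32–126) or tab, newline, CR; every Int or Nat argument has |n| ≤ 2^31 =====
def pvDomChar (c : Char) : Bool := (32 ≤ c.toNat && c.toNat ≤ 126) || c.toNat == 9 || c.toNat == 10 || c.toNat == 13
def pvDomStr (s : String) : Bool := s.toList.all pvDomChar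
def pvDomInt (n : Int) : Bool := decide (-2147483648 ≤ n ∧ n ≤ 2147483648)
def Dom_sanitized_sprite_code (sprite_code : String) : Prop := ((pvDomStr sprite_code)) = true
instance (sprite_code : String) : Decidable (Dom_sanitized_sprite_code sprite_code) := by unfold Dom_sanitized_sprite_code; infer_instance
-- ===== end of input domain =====

-- B replaces A's branch-specific split/rstrip/slice bookkeeping by one scan for the
-- maximal trailing lowercase run of the whole string plus a partition at the dot
-- (objective: simpler; same cost).

-- ===== PORT A =====
-- ALPHABET = string.ascii_lowercase
def pvAlphabet : List Char := "abcdefghijklmnopqrstuvwxyz".toList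
-- ALLOWED_SPRITE_CODE_CHAR = set(ALPHABET + string.digits + '.')
def pvAllowed : PySem.Set Char := PySem.Set.ofList ("abcdefghijklmnopqrstuvwxyz0123456789.".toList)
-- str_check(s, substr) = set(s) <= substr
def pvStrCheck (s : List Char) (substr : PySem.Set Char) : Bool :=
  PySem.Set.issubset (PySem.Set.ofList s) substr
-- s.rstrip(ALPHABET): drop the maximal trailing run of chars of ALPHABET (exact hand port)
def pvRstripAlpha (s : List Char) : List Char :=
  (s.reverse.dropWhile (fun c => pvAlphabet.contains c)).reverse

def sanitized_sprite_code (sprite_code : String) :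
    Option String × Option String × Option String × Option String :=
  let cs := sprite_code.toList
  let split := PySem.Chars.splitOn cs ['.']          -- sprite_code.split('.')
  if !(pvStrCheck cs pvAllowed) then (none, none, none, some "SPECIAL CHARACTERS")
  else if 3 ≤ split.length then (none, none, none, some "TRIPLE+ FUSION")
  else
    let sprite_group := PySem.List.pyGetD split 0 []     -- split_sprite_code[0]; split('.') is never empty
    if 2 ≤ split.length then
      let last_number := PySem.List.pyGetD split (-1) [] -- split_sprite_code[-1]
      let stripped := pvRstripAlpha last_number
      -- for pokedex_number in split[:-1] + [stripped]: if not isdigit: return EXTRA LETTERS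
      if (split.dropLast ++ [stripped]).all PySem.Chars.strIsdigit then
        let variant := PySem.List.slice last_number (some (stripped.length : Int)) none
        -- (split_sprite_code[-1] = stripped_last_number is a dead store: nothing below reads it)
        let recombined := PySem.List.slice cs none (some ((cs.length : Int) - (variant.length : Int)))
        (some (String.ofList sprite_group), some (String.ofList recombined), some (String.ofList variant), none)
      else (none, none, none, some "EXTRA LETTERS")
    else
      let sg := pvRstripAlpha sprite_group
      let variant := PySem.List.slice cs (some (sg.length : Int)) none
      (some (String.ofList sg), some (String.ofList sg), some (String.ofList variant), none)

-- ===== PORT B =====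
-- the while loop over rev = sprite_code[::-1]: counts the maximal leading run of
-- chars with 'rev[t] in ALPHABET' ('c in str' for a 1-character c is membership, exact)
def pvRunLen (rev : List Char) : Nat :=
  match rev with
  | [] => 0
  | c :: rest => if pvAlphabet.contains c then pvRunLen rest + 1 else 0

def sanitized_sprite_code_alt (sprite_code : String) :
    Option String × Option String × Option String × Option String :=
  let cs := sprite_code.toList
  if !(cs.all fun c => PySem.Set.contains pvAllowed c) then
    (none, none, none, some "SPECIAL CHARACTERS")
  else
    let ndots := cs.count '.'
    if 2 ≤ ndots then (none, none, none, some "TRIPLE+ FUSION")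
    else
      let t := pvRunLen cs.reverse               -- rev = sprite_code[::-1]; while-loop count
      let cut := cs.length - t
      let number := PySem.List.slice cs none (some (cut : Int))   -- sprite_code[:cut]
      let variant := PySem.List.slice cs (some (cut : Int)) none  -- sprite_code[cut:]
      if ndots = 1 then
        -- number.partition('.'): the pieces before / after the first '.' (exact hand port)
        let head := number.takeWhile (fun c => c != '.')
        let tail := (number.dropWhile (fun c => c != '.')).drop 1
        if PySem.Chars.strIsdigit head && PySem.Chars.strIsdigit tail then
          (some (String.ofList head), some (String.ofList number), some (String.ofList variant), none)
        else (none, none, none, some "EXTRA LETTERS")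
      else (some (String.ofList number), some (String.ofList number), some (String.ofList variant), none)

-- ===== PRECONDITION & SPEC =====
def Spec_sanitized_sprite_code (sprite_code : String) (out : Option String × Option String × Option String × Option String) : Prop := out = sanitized_sprite_code_alt sprite_code
instance (sprite_code : String) (out : Option String × Option String × Option String × Option String) : Decidable (Spec_sanitized_sprite_code sprite_code out) := by unfold Spec_sanitized_sprite_code; infer_instance

-- ===== CLAIM (what is proved, stated in full; the proofs are below) =====
def Claim_equal_sanitized_sprite_code : Prop := ∀ (sprite_code : String), Dom_sanitized_sprite_code sprite_code → Spec_sanitized_sprite_code sprite_code (sanitized_sprite_code sprite_code)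

-- ===== LEMMAS AND PROOFS =====

theorem pv_guard_eq (cs : List Char) :
    pvStrCheck cs pvAllowed = cs.all (fun c => PySem.Set.contains pvAllowed c) := by
  rw [Bool.eq_iff_iff, pvStrCheck, PySem.Set.issubset_iff, List.all_eq_true]
  simp [PySem.Set.mem_ofList, PySem.Set.contains]

-- reference split: pvSplit pre l = the pieces of (pre ++ l), split at '.'
def pvSplit (pre : List Char) : List Char → List (List Char)
  | [] => [pre]
  | c :: rest => if c = '.' then pre :: pvSplit [] rest else pvSplit (pre ++ [c]) rest

theorem pv_go_eq (l : List Char) : ∀ (fuel : Nat) (cur : List Char) (acc : List (List Char)),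
    l.length < fuel →
    PySem.Chars.splitOn.go ['.'] fuel l cur acc = acc.reverse ++ pvSplit cur.reverse l := by
  induction l with
  | nil =>
    intro fuel cur acc h
    match fuel with
    | fuel + 1 => simp [PySem.Chars.splitOn.go, pvSplit]
  | cons c rest ih =>
    intro fuel cur acc h
    simp only [List.length_cons] at h
    match fuel with
    | fuel + 1 =>
      rw [PySem.Chars.splitOn.go]
      by_cases hc : c = '.'
      · subst hc
        have hp : List.isPrefixOf ['.'] ('.' :: rest) = true := by simp [List.isPrefixOf]
        rw [if_pos hp]
        show PySem.Chars.splitOn.go ['.'] fuel (List.drop 1 ('.' :: rest)) [] (cur.reverse :: acc) = _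
        simp only [List.drop_succ_cons, List.drop_zero]
        rw [ih fuel [] (cur.reverse :: acc) (by simpa using h)]
        simp [pvSplit]
      · have hp : List.isPrefixOf ['.'] (c :: rest) = false := by
          simp [List.isPrefixOf]; exact fun e => hc e.symm
        rw [if_neg (by simp [hp])]
        rw [ih fuel (c :: cur) acc (by omega)]
        simp [pvSplit, hc]

theorem pv_splitOn_eq (cs : List Char) :
    PySem.Chars.splitOn cs ['.'] = pvSplit [] cs := by
  rw [PySem.Chars.splitOn, pv_go_eq cs (cs.length + 1) [] [] (by omega)]
  rfl

theorem pvSplit_length (l : List Char) : ∀ pre, (pvSplit pre l).length = l.count '.' + 1 := by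
  induction l with
  | nil => simp [pvSplit]
  | cons c rest ih =>
    intro pre
    by_cases hc : c = '.' <;> simp [pvSplit, hc, ih]

theorem pvSplit_no_dot (l : List Char) (h : l.count '.' = 0) :
    ∀ pre, pvSplit pre l = [pre ++ l] := by
  induction l with
  | nil => simp [pvSplit]
  | cons c rest ih =>
    intro pre
    rw [List.count_cons] at h
    have hc : c ≠ '.' := by intro e; simp [e] at h
    simp [pvSplit, hc, ih (by omega)]

theorem pvSplit_dot (l r : List Char) (h : l.count '.' = 0) :
    ∀ pre, pvSplit pre (l ++ '.' :: r) = (pre ++ l) :: pvSplit [] r := by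
  induction l with
  | nil => simp [pvSplit]
  | cons c rest ih =>
    intro pre
    rw [List.count_cons] at h
    have hc : c ≠ '.' := by intro e; simp [e] at h
    simp [pvSplit, hc, ih (by omega)]

theorem pvRunLen_le (xs : List Char) : pvRunLen xs ≤ xs.length := by
  induction xs with
  | nil => simp [pvRunLen]
  | cons c rest ih => simp only [pvRunLen, List.length_cons]; split <;> omega

theorem pv_dropWhile_eq_drop (xs : List Char) :
    xs.dropWhile (fun c => pvAlphabet.contains c) = xs.drop (pvRunLen xs) := by
  induction xs with
  | nil => rfl
  | cons c rest ih =>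
    simp only [pvRunLen, List.dropWhile_cons]
    split <;> simp_all

theorem pvRunLen_append (xs ys : List Char) (y : Char) (hy : pvAlphabet.contains y = false) :
    pvRunLen (xs ++ y :: ys) = pvRunLen xs := by
  induction xs with
  | nil => simp only [List.nil_append, pvRunLen, hy, Bool.false_eq_true, if_false]
  | cons c rest ih => simp only [List.cons_append, pvRunLen, ih]

theorem pvRstrip_eq_take (s : List Char) :
    pvRstripAlpha s = s.take (s.length - pvRunLen s.reverse) := by
  rw [pvRstripAlpha, pv_dropWhile_eq_drop, List.drop_reverse, List.reverse_reverse]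

theorem pv_takeWhile_ne_dot (l m : List Char) (h : l.count '.' = 0) :
    (l ++ '.' :: m).takeWhile (fun c => c != '.') = l := by
  induction l with
  | nil => simp
  | cons c rest ih =>
    rw [List.count_cons] at h
    have hc : c ≠ '.' := by intro e; simp [e] at h
    simp only [List.cons_append, List.takeWhile_cons]
    simp [hc, ih (by omega)]

theorem pv_dropWhile_ne_dot (l m : List Char) (h : l.count '.' = 0) :
    (l ++ '.' :: m).dropWhile (fun c => c != '.') = '.' :: m := by
  induction l with
  | nil => simp
  | cons c rest ih =>
    rw [List.count_cons] at h
    have hc : c ≠ '.' := by intro e; simp [e] at h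
    simp only [List.cons_append, List.dropWhile_cons]
    simp [hc, ih (by omega)]

theorem pv_decomp (cs : List Char) (h : cs.count '.' = 1) :
    ∃ l r, cs = l ++ '.' :: r ∧ l.count '.' = 0 ∧ r.count '.' = 0 := by
  induction cs with
  | nil => simp at h
  | cons c rest ih =>
    rw [List.count_cons] at h
    by_cases hc : c = '.'
    · subst hc
      exact ⟨[], rest, by simp, by simp, by simpa using h⟩
    · obtain ⟨l, r, h1, h2, h3⟩ := ih (by simpa [hc] using h)
      exact ⟨c :: l, r, by simp [h1], by simp [hc, h2], h3⟩

-- ===== VERDICT (by name: the statement is the Claim_ definition above) =====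
theorem sanitized_sprite_code_spec : Claim_equal_sanitized_sprite_code := by
  intro s _
  unfold Spec_sanitized_sprite_code sanitized_sprite_code sanitized_sprite_code_alt
  generalize s.toList = cs
  dsimp only
  rw [pv_guard_eq, pv_splitOn_eq]
  by_cases hg : cs.all (fun c => PySem.Set.contains pvAllowed c) = true
  case neg => simp only [hg]; simp
  simp only [hg, Bool.not_true, Bool.false_eq_true, if_false]
  -- three cases on the number of dots
  rcases hn : cs.count '.' with _ | n
  · -- no dot: split('.') = [cs]; both strip the trailing letter run of the whole string
    rw [pvSplit_no_dot cs hn]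
    simp only [List.nil_append]
    have hle : pvRunLen cs.reverse ≤ cs.length := by
      simpa using pvRunLen_le cs.reverse
    rw [if_neg (show ¬ 3 ≤ ([cs] : List (List Char)).length by simp),
      if_neg (show ¬ (2:Nat) ≤ 0 by omega),
      if_neg (show ¬ 2 ≤ ([cs] : List (List Char)).length by simp),
      if_neg (show ¬ (0:Nat) = 1 by omega),
      PySem.List.pyGetD_zero_cons, pvRstrip_eq_take,
      PySem.List.slice_from_natCast, PySem.List.slice_to_natCast,
      PySem.List.slice_from_natCast, List.length_take,
      Nat.min_eq_left (Nat.sub_le _ _)]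
  rcases n with _ | n
  · -- exactly one dot: cs = l ++ '.' :: r with l, r dot-free
    obtain ⟨l, r, rfl, hl, hr⟩ := pv_decomp cs hn
    rw [pvSplit_dot l r hl, pvSplit_no_dot r hr]
    simp only [List.nil_append]
    have ht : pvRunLen (l ++ '.' :: r).reverse = pvRunLen r.reverse := by
      rw [show (l ++ '.' :: r).reverse = r.reverse ++ '.' :: l.reverse by simp,
        pvRunLen_append _ _ _ (by decide)]
    have htr : pvRunLen r.reverse ≤ r.length := by simpa using pvRunLen_le r.reverse
    rw [if_neg (show ¬ 3 ≤ ([l, r] : List (List Char)).length by simp),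
      if_neg (show ¬ (2:Nat) ≤ 0 + 1 by omega),
      if_pos (show 2 ≤ ([l, r] : List (List Char)).length by simp),
      if_pos (show True from trivial),
      PySem.List.pyGetD_zero_cons,
      show ([l, r] : List (List Char)) = [l] ++ [r] from rfl,
      PySem.List.pyGetD_neg_one_append_singleton, pvRstrip_eq_take, ht]
    set t := pvRunLen r.reverse with htdef
    have hcut : (l ++ '.' :: r).length - t = (l ++ ['.']).length + (r.length - t) := by
      simp only [List.length_append, List.length_cons, List.length_nil]; omega
    have hnum : (l ++ '.' :: r).take ((l ++ '.' :: r).length - t)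
        = l ++ '.' :: r.take (r.length - t) := by
      rw [hcut, show l ++ '.' :: r = (l ++ ['.']) ++ r by simp,
        List.take_length_add_append]
      simp
    have hvar : (l ++ '.' :: r).drop ((l ++ '.' :: r).length - t)
        = r.drop (r.length - t) := by
      rw [hcut, show l ++ '.' :: r = (l ++ ['.']) ++ r by simp,
        List.drop_length_add_append]
    simp only [List.dropLast_concat, List.all_append, List.all_cons, List.all_nil,
      Bool.and_true]
    rw [List.length_take, Nat.min_eq_left (Nat.sub_le _ _),
      PySem.List.slice_from_natCast, PySem.List.slice_to_natCast,
      PySem.List.slice_from_natCast,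
      hnum, hvar, pv_takeWhile_ne_dot _ _ hl, pv_dropWhile_ne_dot _ _ hl,
      List.drop_one, List.tail_cons]
    have hbound : ((l ++ '.' :: r).length : Int) - ((r.drop (r.length - t)).length : Int)
        = (((l ++ '.' :: r).length - t : Nat) : Int) := by
      simp only [List.length_drop, List.length_append, List.length_cons]
      push_cast
      omega
    rw [hbound, PySem.List.slice_to_natCast, hnum]
  · -- two or more dots: both report TRIPLE+ FUSION
    rw [if_pos (show 3 ≤ (pvSplit [] cs).length by rw [pvSplit_length]; omega),
      if_pos (show (2:Nat) ≤ n + 1 + 1 by omega)]
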